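-- pv_equiv track=rewrite | github.com/massgen/MassGen | massgen/rl/agent_mixin.py | _extract_task_from_messages
-- ===== SOURCE A (Python) =====
-- from typing import Any, AsyncGenerator, Dict, List, Optional
--
-- def _extract_task_from_messages(messages: List[Dict[str, Any]]) -> str:
--     """
--     Extract task description from messages.
--
--     Args:
--         messages: List of messages
--
--     Returns:
--         Task description (usually the last user message)
--     """
--     # Find last user message
--     for message in reversed(messages):
--         if message.get('role') == 'user':
--             content = message.get('content', '')
--             # Truncate if too long
--             if len(content) > 500:
--                 return content[:500] + "..."
--             return content
--
--     return "Unknown task"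
-- ===== SOURCE B (Python) =====
-- def _extract_task_from_messages(messages):
--     """Staged pipeline: collect every user message's content, then take the last one."""
--     contents = [m.get('content', '') for m in messages if m.get('role') == 'user']
--     if not contents:
--         return "Unknown task"
--     content = contents[-1]
--     return content[:500] + "..." if len(content) > 500 else content
-- ===== Notes on version B (the rewrite author's own statement) =====
-- stated objective: idiomatic
-- what changed: Replaces A's reversed scan with early return by a staged pipeline: a list comprehension first collects the contents of all user messages, then the answer is that derived list's last element (with the truncation rule) or 'Unknown task' if it is empty.
import Mathlib
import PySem

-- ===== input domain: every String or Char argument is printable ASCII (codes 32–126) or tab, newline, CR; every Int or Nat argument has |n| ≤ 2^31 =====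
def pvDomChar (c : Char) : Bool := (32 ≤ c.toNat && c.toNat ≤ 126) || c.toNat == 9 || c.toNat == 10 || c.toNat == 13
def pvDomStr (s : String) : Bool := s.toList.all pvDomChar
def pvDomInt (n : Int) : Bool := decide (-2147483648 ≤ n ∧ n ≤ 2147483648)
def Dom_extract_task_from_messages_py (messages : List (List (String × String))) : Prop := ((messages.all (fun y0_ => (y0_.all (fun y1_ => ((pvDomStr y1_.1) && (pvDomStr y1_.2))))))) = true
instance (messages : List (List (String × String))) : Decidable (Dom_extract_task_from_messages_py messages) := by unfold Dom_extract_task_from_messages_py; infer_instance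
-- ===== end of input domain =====

-- B replaces A's reversed scan with early return by a staged pipeline: collect all user contents, then take the last (same cost, more idiomatic decomposition).


-- ===== PORT A =====
-- dict.get on an association list: first matching key (the dict convention)
def pvAGet (m : List (String × String)) (k : String) : Option String :=
  (m.find? (fun p => p.1 == k)).map (·.2)

-- A: scan reversed(messages), return at the first user message
def pvScanRev : List (List (String × String)) → String
  | [] => "Unknown task"
  | m :: rest =>
    if pvAGet m "role" = some "user" then
      let content := (pvAGet m "content").getD ""
      if 500 < PySem.Str.len content then PySem.Str.slice content none (some 500) ++ "..."
      else content
    else pvScanRev rest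

def extract_task_from_messages_py (messages : List (List (String × String))) : String :=
  pvScanRev messages.reverse

-- ===== PORT B =====
-- B: comprehension (filter then map) giving all user contents, then the last element
def extract_task_from_messages_py_alt (messages : List (List (String × String))) : String :=
  let contents := (messages.filter (fun m => pvAGet m "role" == some "user")).map
    (fun m => (pvAGet m "content").getD "")
  match contents.getLast? with
  | none => "Unknown task"
  | some content =>
    if 500 < PySem.Str.len content then PySem.Str.slice content none (some 500) ++ "..."
    else content

-- ===== PRECONDITION & SPEC =====
def Spec_extract_task_from_messages_py (messages : List (List (String × String))) (out : String) : Prop := out = extract_task_from_messages_py_alt messages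
instance (messages : List (List (String × String))) (out : String) : Decidable (Spec_extract_task_from_messages_py messages out) := by unfold Spec_extract_task_from_messages_py; infer_instance

-- ===== CLAIM (what is proved, stated in full; the proofs are below) =====
def Claim_equal_extract_task_from_messages_py : Prop := ∀ (messages : List (List (String × String))), Dom_extract_task_from_messages_py messages → Spec_extract_task_from_messages_py messages (extract_task_from_messages_py messages)

-- ===== LEMMAS AND PROOFS =====

-- find?-characterisation of A's reversed scan
theorem pvScanRev_eq_find (L : List (List (String × String))) :
    pvScanRev L = match L.find? (fun m => pvAGet m "role" == some "user") with
      | none => "Unknown task"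
      | some m =>
        let content := (pvAGet m "content").getD ""
        if 500 < PySem.Str.len content then PySem.Str.slice content none (some 500) ++ "..."
        else content := by
  induction L with
  | nil => rfl
  | cons m rest ih =>
    by_cases h : pvAGet m "role" = some "user"
    · simp [pvScanRev, h, List.find?]
    · have hb : (pvAGet m "role" == some "user") = false := by simp [h]
      simp [pvScanRev, h, List.find?, ih, hb]

-- B's derived-list last element is the first match of the reversed list
theorem pvLast_filter_eq_find (L : List (List (String × String))) :
    ((L.filter (fun m => pvAGet m "role" == some "user")).map
        (fun m => (pvAGet m "content").getD "")).getLast?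
      = (L.reverse.find? (fun m => pvAGet m "role" == some "user")).map
          (fun m => (pvAGet m "content").getD "") := by
  rw [List.getLast?_eq_head?_reverse, ← List.map_reverse, ← List.filter_reverse,
    List.head?_map, List.head?_filter]

-- ===== VERDICT (by name: the statement is the Claim_ definition above) =====
theorem extract_task_from_messages_py_spec : Claim_equal_extract_task_from_messages_py := by
  intro messages _
  unfold Spec_extract_task_from_messages_py extract_task_from_messages_py extract_task_from_messages_py_alt
  rw [pvScanRev_eq_find]
  have h := pvLast_filter_eq_find messages
  simp only [h]
  cases messages.reverse.find? (fun m => pvAGet m "role" == some "user") <;> rfl
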